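-- pv_equiv track=rewrite | github.com/tqcuong2000/agent_cli | agent_cli/agent/base.py | _hydrate_session_messages
-- ===== SOURCE A (Python) =====
-- from typing import Any, Dict, List, Optional
--
-- def _hydrate_session_messages(
--     session_messages: List[Dict[str, Any]],
--     system_prompt: str,
-- ) -> List[Dict[str, Any]]:
--     """Replace stale session system prompt with a fresh task-scoped one."""
--     hydrated: List[Dict[str, Any]] = [{"role": "system", "content": system_prompt}]
--
--     skipped_system = False
--     for message in session_messages:
--         if not skipped_system and message.get("role") == "system":
--             skipped_system = True
--             continue
--         hydrated.append(message)
--     return hydrated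
-- ===== SOURCE B (Python) =====
-- from typing import Any, Dict, List, Optional
--
-- def _hydrate_session_messages(
--     session_messages: List[Dict[str, Any]],
--     system_prompt: str,
-- ) -> List[Dict[str, Any]]:
--     """Replace stale session system prompt with a fresh task-scoped one."""
--     fresh = {"role": "system", "content": system_prompt}
--     idx = next((i for i, m in enumerate(session_messages) if m.get("role") == "system"), None)
--     if idx is None:
--         return [fresh] + list(session_messages)
--     return [fresh] + session_messages[:idx] + session_messages[idx + 1:]
-- ===== Notes on version B (the rewrite author's own statement) =====
-- stated objective: idiomatic
-- what changed: Replaced the stateful skip-flag accumulation loop with an up-front find-index (next over enumerate) followed by slice concatenation; no per-element append loop or boolean state remains.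
import Mathlib
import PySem

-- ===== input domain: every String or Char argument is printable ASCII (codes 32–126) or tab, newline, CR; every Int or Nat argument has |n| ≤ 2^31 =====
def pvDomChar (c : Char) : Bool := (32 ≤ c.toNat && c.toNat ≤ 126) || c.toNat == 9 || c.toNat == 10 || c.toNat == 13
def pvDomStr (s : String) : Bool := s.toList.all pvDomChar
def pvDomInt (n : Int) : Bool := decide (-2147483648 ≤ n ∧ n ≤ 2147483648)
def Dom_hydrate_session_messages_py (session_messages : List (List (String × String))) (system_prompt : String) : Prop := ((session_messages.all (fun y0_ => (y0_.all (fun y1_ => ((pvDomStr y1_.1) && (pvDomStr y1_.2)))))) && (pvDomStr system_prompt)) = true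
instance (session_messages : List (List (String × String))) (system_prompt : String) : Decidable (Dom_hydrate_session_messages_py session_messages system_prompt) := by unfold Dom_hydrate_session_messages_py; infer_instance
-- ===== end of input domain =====

-- B replaces A's stateful skip-flag loop with a find-first-system-index then slice-concatenate decomposition (idiomatic; return value only).


-- ===== PORT A =====
-- m.get("role") == "system"  ⇔  first-match lookup of "role" is some "system"
def pvIsSystem (m : List (String × String)) : Bool :=
  List.lookup "role" m == some "system"

-- literal transliteration of A: one pass carrying (skipped_system, hydrated)
def hydrate_session_messages_py (session_messages : List (List (String × String))) (system_prompt : String) : List (List (String × String)) :=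
  (session_messages.foldl
    (fun (st : Bool × List (List (String × String))) m =>
      if !st.1 && pvIsSystem m then (true, st.2)
      else (st.1, st.2 ++ [m]))
    (false, [[("role", "system"), ("content", system_prompt)]])).2

-- ===== PORT B =====
def hydrate_session_messages_py_alt (session_messages : List (List (String × String))) (system_prompt : String) : List (List (String × String)) :=
  let fresh := [("role", "system"), ("content", system_prompt)]
  match session_messages.findIdx? pvIsSystem with
  | none => fresh :: session_messages
  | some i => fresh :: (session_messages.take i ++ session_messages.drop (i + 1))

-- ===== PRECONDITION & SPEC =====
def Spec_hydrate_session_messages_py (session_messages : List (List (String × String))) (system_prompt : String) (out : List (List (String × String))) : Prop := out = hydrate_session_messages_py_alt session_messages system_prompt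
instance (session_messages : List (List (String × String))) (system_prompt : String) (out : List (List (String × String))) : Decidable (Spec_hydrate_session_messages_py session_messages system_prompt out) := by unfold Spec_hydrate_session_messages_py; infer_instance

-- ===== CLAIM =====
def Claim_equal_hydrate_session_messages_py : Prop := ∀ (session_messages : List (List (String × String))) (system_prompt : String), Dom_hydrate_session_messages_py session_messages system_prompt → Spec_hydrate_session_messages_py session_messages system_prompt (hydrate_session_messages_py session_messages system_prompt)

-- ===== LEMMAS AND PROOFS =====
-- once skipped_system is true, A's loop just appends every remaining message
theorem pv_fold_true (sm : List (List (String × String))) :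
    ∀ acc : List (List (String × String)),
    (sm.foldl
      (fun (st : Bool × List (List (String × String))) m =>
        if !st.1 && pvIsSystem m then (true, st.2)
        else (st.1, st.2 ++ [m]))
      (true, acc)) = (true, acc ++ sm) := by
  induction sm with
  | nil => simp
  | cons m rest ih =>
    intro acc
    rw [List.foldl_cons, if_neg (by simp), ih]
    simp

-- A's loop from skipped_system = false, characterised by the first system index
theorem pv_fold_false (sm : List (List (String × String))) :
    ∀ acc : List (List (String × String)),
    ((sm.foldl
      (fun (st : Bool × List (List (String × String))) m =>
        if !st.1 && pvIsSystem m then (true, st.2)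
        else (st.1, st.2 ++ [m]))
      (false, acc)).2 =
      match sm.findIdx? pvIsSystem with
      | none => acc ++ sm
      | some i => acc ++ (sm.take i ++ sm.drop (i + 1))) := by
  induction sm with
  | nil => simp
  | cons m rest ih =>
    intro acc
    by_cases h : pvIsSystem m = true
    · rw [List.foldl_cons, if_pos (by simp [h]), pv_fold_true]
      simp [List.findIdx?_cons, h]
    · rw [List.foldl_cons, if_neg (by simp [h]), ih]
      rcases hf : rest.findIdx? pvIsSystem with _ | i <;>
        simp [List.findIdx?_cons, h, hf, List.take_succ_cons, List.drop_succ_cons]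

-- ===== VERDICT =====
theorem hydrate_session_messages_py_spec : Claim_equal_hydrate_session_messages_py := by
  intro sm sp _
  unfold Spec_hydrate_session_messages_py hydrate_session_messages_py hydrate_session_messages_py_alt
  rw [pv_fold_false]
  cases h : sm.findIdx? pvIsSystem <;> simp
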